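-- pv_equiv track=rewrite | github.com/demiurgo81/Mental | Python/azure_devops_query_exporter.py | preparar_columnas
-- ===== SOURCE A (Python) =====
-- from typing import Callable, Dict, Iterable, List, Sequence
--
-- def preparar_columnas(columns: Sequence[Dict[str, object]]) -> tuple[List[str], Dict[str, str]]:
--     orden: List[str] = []
--     encabezados: Dict[str, str] = {}
--     usados: Dict[str, int] = {}
--
--     def registrar(ref: str, nombre: str) -> None:
--         if ref in orden:
--             return
--         base = nombre or ref
--         contador = usados.get(base, 0)
--         etiqueta = base if contador == 0 else f"{base} ({contador + 1})"
--         usados[base] = contador + 1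
--         encabezados[ref] = etiqueta
--         orden.append(ref)
--
--     for columna in columns:
--         ref = columna.get("referenceName")
--         nombre = columna.get("name")
--         if isinstance(ref, str):
--             registrar(ref, nombre if isinstance(nombre, str) and nombre else ref)
--
--     if "System.Id" not in orden:
--         registrar("System.Id", "ID")
--
--     return orden, encabezados
-- ===== SOURCE B (Python) =====
-- from typing import Dict, List, Sequence
--
--
-- def preparar_columnas(columns: Sequence[Dict[str, object]]) -> tuple[List[str], Dict[str, str]]:
--     # Pass 1: select the ordered, deduplicated column refs and their chosen base names.
--     orden: List[str] = []
--     bases: Dict[str, str] = {}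
--     for columna in columns:
--         ref = columna.get("referenceName")
--         if isinstance(ref, str) and ref not in orden:
--             nombre = columna.get("name")
--             bases[ref] = nombre if isinstance(nombre, str) and nombre else ref
--             orden.append(ref)
--     if "System.Id" not in orden:
--         bases["System.Id"] = "ID"
--         orden.append("System.Id")
--
--     # Pass 2: disambiguate repeated base names with a per-base counter, in orden order.
--     contadores: Dict[str, int] = {}
--     encabezados: Dict[str, str] = {}
--     for ref in orden:
--         base = bases[ref]
--         c = contadores.get(base, 0)
--         encabezados[ref] = base if c == 0 else f"{base} ({c + 1})"
--         contadores[base] = c + 1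
--     return orden, encabezados
-- ===== Notes on version B (the rewrite author's own statement) =====
-- stated objective: alternative
-- what changed: A builds order, headers and usage counters together in one loop through a shared registrar helper; B first selects the ordered deduplicated refs with their chosen base names (appending System.Id/ID if missing), then a separate second pass over that order disambiguates repeated base names with a per-base counter.
import Mathlib
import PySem

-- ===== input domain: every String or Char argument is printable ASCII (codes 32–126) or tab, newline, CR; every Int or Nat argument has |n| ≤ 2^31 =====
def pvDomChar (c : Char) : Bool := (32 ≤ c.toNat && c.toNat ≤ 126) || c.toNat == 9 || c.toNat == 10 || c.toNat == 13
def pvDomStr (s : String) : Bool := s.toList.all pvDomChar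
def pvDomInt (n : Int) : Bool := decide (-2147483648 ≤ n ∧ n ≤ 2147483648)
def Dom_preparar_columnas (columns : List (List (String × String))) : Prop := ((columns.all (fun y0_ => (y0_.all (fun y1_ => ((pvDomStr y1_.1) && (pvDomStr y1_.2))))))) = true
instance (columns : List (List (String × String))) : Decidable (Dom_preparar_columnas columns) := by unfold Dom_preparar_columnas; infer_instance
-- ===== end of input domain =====

-- B replaces A's single loop with a shared `registrar` helper by two passes: one pass selecting the
-- ordered deduplicated refs with their base names, then a separate labeling pass over that order
-- (objective: alternative decomposition, same cost).

-- ===== PORT A =====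
-- A's inner helper `registrar`, transliterated (state = (orden, encabezados, usados)).
def pvRegistrar (st : List String × PySem.Dict String String × PySem.Dict String Int)
    (ref nombre : String) : List String × PySem.Dict String String × PySem.Dict String Int :=
  if ref ∈ st.1 then st
  else
    let base := if nombre ≠ "" then nombre else ref          -- nombre or ref
    let contador := st.2.2.getD base 0
    let etiqueta := if contador = 0 then base
                    else base ++ " (" ++ PySem.Int.toStr (contador + 1) ++ ")"
    (st.1 ++ [ref], st.2.1.insert ref etiqueta, st.2.2.insert base (contador + 1))

-- the body of A's `for columna in columns` loop
def pvStepA (st : List String × PySem.Dict String String × PySem.Dict String Int)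
    (columna : List (String × String)) : List String × PySem.Dict String String × PySem.Dict String Int :=
  match (PySem.Dict.mk columna).get? "referenceName" with
  | none => st                                               -- ref not a str: skip
  | some ref =>
      pvRegistrar st ref
        (match (PySem.Dict.mk columna).get? "name" with      -- nombre if isinstance(nombre,str) and nombre else ref
         | some n => if n ≠ "" then n else ref
         | none => ref)

def preparar_columnas (columns : List (List (String × String))) :
    List String × (List (String × String)) :=
  let st := columns.foldl pvStepA ([], PySem.Dict.empty, PySem.Dict.empty)
  let st := if "System.Id" ∈ st.1 then st else pvRegistrar st "System.Id" "ID"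
  (st.1, st.2.1.items)

-- ===== PORT B =====
-- body of B's first loop: select ordered deduplicated refs and their base names
def pvStepB1 (p : List String × PySem.Dict String String)
    (columna : List (String × String)) : List String × PySem.Dict String String :=
  match (PySem.Dict.mk columna).get? "referenceName" with
  | none => p
  | some ref =>
      if ref ∈ p.1 then p
      else
        (p.1 ++ [ref],
         p.2.insert ref
           (match (PySem.Dict.mk columna).get? "name" with
            | some n => if n ≠ "" then n else ref
            | none => ref))

-- body of B's second loop: label refs in order with a per-base counter
def pvStepB2 (bases : PySem.Dict String String)
    (q : PySem.Dict String String × PySem.Dict String Int) (ref : String) :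
    PySem.Dict String String × PySem.Dict String Int :=
  let base := bases.getD ref ""     -- bases[ref]; exact: every ref in orden has been inserted into bases
  let c := q.2.getD base 0
  (q.1.insert ref (if c = 0 then base else base ++ " (" ++ PySem.Int.toStr (c + 1) ++ ")"),
   q.2.insert base (c + 1))

def preparar_columnas_alt (columns : List (List (String × String))) :
    List String × (List (String × String)) :=
  let p := columns.foldl pvStepB1 ([], PySem.Dict.empty)
  let p := if "System.Id" ∈ p.1 then p
           else (p.1 ++ ["System.Id"], p.2.insert "System.Id" "ID")
  (p.1, (p.1.foldl (pvStepB2 p.2) (PySem.Dict.empty, PySem.Dict.empty)).1.items)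

-- ===== PRECONDITION & SPEC =====
def Spec_preparar_columnas (columns : List (List (String × String))) (out : List String × (List (String × String))) : Prop := out = preparar_columnas_alt columns
instance (columns : List (List (String × String))) (out : List String × (List (String × String))) : Decidable (Spec_preparar_columnas columns out) := by unfold Spec_preparar_columnas; infer_instance

-- ===== CLAIM (what is proved, stated in full; the proofs are below) =====
def Claim_equal_preparar_columnas : Prop := ∀ (columns : List (List (String × String))), Dom_preparar_columnas columns → Spec_preparar_columnas columns (preparar_columnas columns)

-- ===== LEMMAS AND PROOFS =====

-- B's second pass run over a prefix `orden` with base table `bases`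
def pvRelabel (bases : PySem.Dict String String) (orden : List String) :
    PySem.Dict String String × PySem.Dict String Int :=
  orden.foldl (pvStepB2 bases) (PySem.Dict.empty, PySem.Dict.empty)

lemma pvRelabel_congr (orden : List String) (bases bases' : PySem.Dict String String)
    (h : ∀ r ∈ orden, bases'.getD r "" = bases.getD r "") :
    pvRelabel bases' orden = pvRelabel bases orden := by
  unfold pvRelabel
  exact PySem.List.foldl_congr_mem orden (pvStepB2 bases') (pvStepB2 bases) _
    (by intro acc r hr; unfold pvStepB2; rw [h r hr])

lemma pvRelabel_snoc (orden : List String) (bases : PySem.Dict String String)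
    (ref base : String) (h : ref ∉ orden) :
    pvRelabel (bases.insert ref base) (orden ++ [ref])
      = pvStepB2 (bases.insert ref base) (pvRelabel bases orden) ref := by
  unfold pvRelabel
  rw [List.foldl_append]
  have hc : ∀ r ∈ orden, (bases.insert ref base).getD r "" = bases.getD r "" := by
    intro r hr
    have : r ≠ ref := fun he => h (he ▸ hr)
    simp [PySem.Dict.getD, PySem.Dict.get?_insert_of_ne bases base this]
  rw [show List.foldl (pvStepB2 (bases.insert ref base)) (PySem.Dict.empty, PySem.Dict.empty) orden
        = pvRelabel (bases.insert ref base) orden from rfl,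
      pvRelabel_congr orden bases _ hc]
  rfl

-- registrar on A's state = append + insert on B's state, re-labeled
lemma pvRegistrar_relabel (orden : List String) (bases : PySem.Dict String String)
    (ref nombre : String) :
    pvRegistrar (orden, pvRelabel bases orden) ref nombre
      = (if ref ∈ orden then ((orden, pvRelabel bases orden) :
            List String × PySem.Dict String String × PySem.Dict String Int)
         else (orden ++ [ref],
               pvRelabel (bases.insert ref (if nombre ≠ "" then nombre else ref)) (orden ++ [ref]))) := by
  by_cases hm : ref ∈ orden
  · simp [pvRegistrar, hm]
  · simp only [pvRegistrar, if_neg hm]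
    rw [pvRelabel_snoc orden bases ref _ hm]
    unfold pvStepB2
    simp [PySem.Dict.getD, PySem.Dict.get?_insert_self]

lemma pvStepA_eq (st : List String × PySem.Dict String String) (c : List (String × String)) :
    pvStepA (st.1, pvRelabel st.2 st.1) c
      = ((pvStepB1 st c).1, pvRelabel (pvStepB1 st c).2 (pvStepB1 st c).1) := by
  obtain ⟨orden, bases⟩ := st
  unfold pvStepA pvStepB1
  cases href : (PySem.Dict.mk c).get? "referenceName" with
  | none => rfl
  | some ref =>
      dsimp only
      rw [pvRegistrar_relabel]
      by_cases hm : ref ∈ orden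
      · simp [hm]
      · simp only [if_neg hm]
        cases hname : (PySem.Dict.mk c).get? "name" with
        | none => simp
        | some n => by_cases hn : n = "" <;> simp [hn]

lemma pvFold_eq (columns : List (List (String × String))) :
    ∀ (orden : List String) (bases : PySem.Dict String String),
    List.foldl pvStepA (orden, pvRelabel bases orden) columns
      = ((List.foldl pvStepB1 (orden, bases) columns).1,
         pvRelabel (List.foldl pvStepB1 (orden, bases) columns).2
           (List.foldl pvStepB1 (orden, bases) columns).1) := by
  induction columns with
  | nil => intro orden bases; rfl
  | cons c cs ih =>
      intro orden bases
      simp only [List.foldl_cons]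
      rw [pvStepA_eq (orden, bases) c, ih]

-- ===== VERDICT (by name: the statement is the Claim_ definition above) =====
theorem preparar_columnas_spec : Claim_equal_preparar_columnas := by
  intro columns _
  unfold Spec_preparar_columnas preparar_columnas preparar_columnas_alt
  have h0 : (([], PySem.Dict.empty, PySem.Dict.empty) :
      List String × PySem.Dict String String × PySem.Dict String Int)
      = ([], pvRelabel PySem.Dict.empty []) := rfl
  rw [h0, pvFold_eq columns [] PySem.Dict.empty]
  set p := List.foldl pvStepB1 ([], PySem.Dict.empty) columns with hp
  by_cases hm : "System.Id" ∈ p.1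
  · simp [hm, pvRelabel]
  · simp only [if_neg hm]
    rw [pvRegistrar_relabel p.1 p.2 "System.Id" "ID", if_neg hm]
    have : (if ("ID" : String) ≠ "" then ("ID" : String) else "System.Id") = "ID" := by decide
    rw [this]
    simp [pvRelabel]
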